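-- pv_equiv track=rewrite | github.com/connorhoehn/HoehnPhotosOrganizer | infra/hoehn_photos_cdk/lambdas/_shared/authz.py | _role_from_claims
-- ===== SOURCE A (Python) =====
-- from typing import Any, Iterable
--
-- VALID_ROLES: tuple[str, ...] = ("admin", "owner", "member", "viewer", "guest")
--
-- def _role_from_claims(claims: dict[str, Any], groups: list[str]) -> str:
--     """Prefer explicit custom:role; else derive from groups with admin>owner>member>viewer."""
--     explicit = claims.get("custom:role")
--     if isinstance(explicit, str) and explicit in VALID_ROLES:
--         return explicit
--
--     # Ordered check so highest privilege wins when a user is in multiple groups.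
--     for role in ("admin", "owner", "member", "viewer"):
--         if role in groups:
--             return role
--
--     # Authenticated Cognito users without any group default to viewer.
--     return "viewer"
-- ===== SOURCE B (Python) =====
-- PRIORITY = {"admin": 0, "owner": 1, "member": 2, "viewer": 3}
-- VALID_ROLES = ("admin", "owner", "member", "viewer", "guest")
--
-- def _role_from_claims(claims, groups):
--     """Prefer explicit custom:role; else single scan over groups keeping the best-ranked group."""
--     explicit = claims.get("custom:role")
--     if isinstance(explicit, str) and explicit in VALID_ROLES:
--         return explicit
--     best_role = None
--     best_rank = None
--     for g in groups:
--         r = PRIORITY.get(g)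
--         if r is not None and (best_rank is None or r < best_rank):
--             best_role, best_rank = g, r
--     return best_role if best_role is not None else "viewer"
-- ===== Notes on version B (the rewrite author's own statement) =====
-- stated objective: alternative
-- what changed: Replaces the fixed-priority tuple scan with repeated membership tests over groups by a single pass over groups that keeps the group of smallest rank from a rank map, defaulting to viewer.
import Mathlib
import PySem

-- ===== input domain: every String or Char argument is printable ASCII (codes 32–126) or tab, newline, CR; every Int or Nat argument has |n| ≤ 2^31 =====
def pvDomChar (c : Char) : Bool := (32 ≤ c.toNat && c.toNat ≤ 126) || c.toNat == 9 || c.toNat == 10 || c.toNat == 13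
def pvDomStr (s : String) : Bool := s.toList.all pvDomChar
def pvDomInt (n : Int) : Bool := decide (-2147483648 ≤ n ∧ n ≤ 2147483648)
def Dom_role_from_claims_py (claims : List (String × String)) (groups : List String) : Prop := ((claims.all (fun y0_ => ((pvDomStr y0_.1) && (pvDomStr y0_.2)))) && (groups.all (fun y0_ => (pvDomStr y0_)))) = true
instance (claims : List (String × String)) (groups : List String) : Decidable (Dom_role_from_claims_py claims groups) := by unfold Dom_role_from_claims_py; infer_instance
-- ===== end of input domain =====

-- B replaces A's scan over the fixed priority tuple (a membership test in groups per role) by a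
-- single pass over groups keeping the group of smallest rank from a rank map; same results.

-- ===== PORT A =====
def pvValidRoles : List String := ["admin", "owner", "member", "viewer", "guest"]

-- the `for role in ("admin","owner","member","viewer")` loop of A
def pvALoop (groups : List String) : List String → String
  | [] => "viewer"
  | r :: rs => if groups.contains r then r else pvALoop groups rs

def role_from_claims_py (claims : List (String × String)) (groups : List String) : String :=
  match (PySem.Dict.mk claims).get? "custom:role" with
  | some explicit =>
      if pvValidRoles.contains explicit then explicit
      else pvALoop groups ["admin", "owner", "member", "viewer"]
  | none => pvALoop groups ["admin", "owner", "member", "viewer"]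

-- ===== PORT B =====
-- PRIORITY.get(g)
def pvRank? (g : String) : Option Nat :=
  (PySem.Dict.mk [("admin", 0), ("owner", 1), ("member", 2), ("viewer", 3)]).get? g

-- the `for g in groups` loop of B; state = (best_role, best_rank), none when unset
def pvBLoop : List String → Option (String × Nat) → Option (String × Nat)
  | [], st => st
  | g :: gs, st =>
    match pvRank? g, st with
    | none, _ => pvBLoop gs st
    | some r, none => pvBLoop gs (some (g, r))
    | some r, some (bg, br) =>
        if r < br then pvBLoop gs (some (g, r)) else pvBLoop gs (some (bg, br))

def role_from_claims_py_alt (claims : List (String × String)) (groups : List String) : String :=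
  match (PySem.Dict.mk claims).get? "custom:role" with
  | some explicit =>
      if pvValidRoles.contains explicit then explicit
      else match pvBLoop groups none with
           | some (g, _) => g
           | none => "viewer"
  | none =>
      match pvBLoop groups none with
      | some (g, _) => g
      | none => "viewer"

-- ===== PRECONDITION & SPEC =====
def Spec_role_from_claims_py (claims : List (String × String)) (groups : List String) (out : String) : Prop := out = role_from_claims_py_alt claims groups
instance (claims : List (String × String)) (groups : List String) (out : String) : Decidable (Spec_role_from_claims_py claims groups out) := by unfold Spec_role_from_claims_py; infer_instance

-- ===== CLAIM (what is proved, stated in full; the proofs are below) =====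
def Claim_equal_role_from_claims_py : Prop := ∀ (claims : List (String × String)) (groups : List String), Dom_role_from_claims_py claims groups → Spec_role_from_claims_py claims groups (role_from_claims_py claims groups)

-- ===== LEMMAS AND PROOFS =====

-- name of each rank
def pvName : Nat → String
  | 0 => "admin"
  | 1 => "owner"
  | 2 => "member"
  | _ => "viewer"

-- min on Option Nat
def pvMerge : Option Nat → Option Nat → Option Nat
  | none, b => b
  | a, none => a
  | some x, some y => some (min x y)

-- best rank reachable from accumulator b over gs
def pvBest : List String → Option Nat → Option Nat
  | [], b => b
  | g :: gs, b => pvBest gs (pvMerge b (pvRank? g))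

theorem pvMerge_none_right (a : Option Nat) : pvMerge a none = a := by
  cases a <;> rfl

theorem pvMerge_assoc (a b c : Option Nat) :
    pvMerge (pvMerge a b) c = pvMerge a (pvMerge b c) := by
  cases a <;> cases b <;> cases c <;> simp [pvMerge, Nat.min_assoc]

theorem pvRank?_spec (g : String) (r : Nat) (h : pvRank? g = some r) :
    g = pvName r := by
  by_cases h0 : g = "admin"
  · subst h0
    rw [show pvRank? "admin" = some 0 from by decide] at h
    injection h with hr; subst hr; rfl
  by_cases h1 : g = "owner"
  · subst h1
    rw [show pvRank? "owner" = some 1 from by decide] at h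
    injection h with hr; subst hr; rfl
  by_cases h2 : g = "member"
  · subst h2
    rw [show pvRank? "member" = some 2 from by decide] at h
    injection h with hr; subst hr; rfl
  by_cases h3 : g = "viewer"
  · subst h3
    rw [show pvRank? "viewer" = some 3 from by decide] at h
    injection h with hr; subst hr; rfl
  · exfalso
    have h0' : ¬("admin" = g) := fun e => h0 e.symm
    have h1' : ¬("owner" = g) := fun e => h1 e.symm
    have h2' : ¬("member" = g) := fun e => h2 e.symm
    have h3' : ¬("viewer" = g) := fun e => h3 e.symm
    simp [pvRank?, PySem.Dict.get?, h0', h1', h2', h3'] at h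

theorem pvBLoop_eq (gs : List String) :
    ∀ b : Option Nat,
      pvBLoop gs (b.map fun r => (pvName r, r)) = (pvBest gs b).map fun r => (pvName r, r) := by
  induction gs with
  | nil => intro b; rfl
  | cons g gs ih =>
    intro b
    cases hr : pvRank? g with
    | none =>
      simp only [pvBLoop, pvBest, hr, pvMerge_none_right]
      exact ih b
    | some r =>
      have hg : g = pvName r := pvRank?_spec g r hr
      cases b with
      | none =>
        subst hg
        simpa [pvBLoop, pvBest, hr, pvMerge] using ih (some r)
      | some br =>
        subst hg
        by_cases hlt : r < br
        · have hm : pvMerge (some br) (some r) = some r := by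
            simp only [pvMerge]; congr 1; omega
          simp only [pvBLoop, pvBest, hr, hm, Option.map_some, if_pos hlt]
          exact ih (some r)
        · have hm : pvMerge (some br) (some r) = some br := by
            simp only [pvMerge]; congr 1; omega
          simp only [pvBLoop, pvBest, hr, hm, Option.map_some, if_neg hlt]
          exact ih (some br)

theorem pvBest_acc (gs : List String) :
    ∀ b, pvBest gs b = pvMerge b (pvBest gs none) := by
  induction gs with
  | nil => intro b; exact (pvMerge_none_right b).symm
  | cons g gs ih =>
    intro b
    show pvBest gs (pvMerge b (pvRank? g)) = pvMerge b (pvBest gs (pvMerge none (pvRank? g)))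
    rw [ih (pvMerge b (pvRank? g)), show pvMerge none (pvRank? g) = pvRank? g from rfl,
        ih (pvRank? g), pvMerge_assoc]

theorem pvBest_none_eq (gs : List String) :
    pvBest gs none =
      if "admin" ∈ gs then some 0
      else if "owner" ∈ gs then some 1
      else if "member" ∈ gs then some 2
      else if "viewer" ∈ gs then some 3
      else none := by
  induction gs with
  | nil => rfl
  | cons g gs ih =>
    have step : pvBest (g :: gs) none = pvMerge (pvRank? g) (pvBest gs none) :=
      pvBest_acc gs (pvMerge none (pvRank? g))
    rw [step, ih]
    by_cases h0 : g = "admin"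
    · subst h0
      simp only [show pvRank? "admin" = some 0 from by decide, List.mem_cons]
      split_ifs <;> simp_all [pvMerge]
    by_cases h1 : g = "owner"
    · subst h1
      simp only [show pvRank? "owner" = some 1 from by decide, List.mem_cons]
      split_ifs <;> simp_all [pvMerge]
    by_cases h2 : g = "member"
    · subst h2
      simp only [show pvRank? "member" = some 2 from by decide, List.mem_cons]
      split_ifs <;> simp_all [pvMerge]
    by_cases h3 : g = "viewer"
    · subst h3
      simp only [show pvRank? "viewer" = some 3 from by decide, List.mem_cons]
      split_ifs <;> simp_all [pvMerge]
    · have hr : pvRank? g = none := by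
        have h0' : ¬("admin" = g) := fun e => h0 e.symm
        have h1' : ¬("owner" = g) := fun e => h1 e.symm
        have h2' : ¬("member" = g) := fun e => h2 e.symm
        have h3' : ¬("viewer" = g) := fun e => h3 e.symm
        simp [pvRank?, PySem.Dict.get?, h0', h1', h2', h3']
      simp only [hr, List.mem_cons]
      have e0 : ("admin" = g ∨ "admin" ∈ gs) ↔ "admin" ∈ gs :=
        or_iff_right (fun e => h0 e.symm)
      have e1 : ("owner" = g ∨ "owner" ∈ gs) ↔ "owner" ∈ gs :=
        or_iff_right (fun e => h1 e.symm)
      have e2 : ("member" = g ∨ "member" ∈ gs) ↔ "member" ∈ gs :=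
        or_iff_right (fun e => h2 e.symm)
      have e3 : ("viewer" = g ∨ "viewer" ∈ gs) ↔ "viewer" ∈ gs :=
        or_iff_right (fun e => h3 e.symm)
      simp only [e0, e1, e2, e3]
      cases hb : pvBest gs none <;> rfl

theorem pv_group_branch (groups : List String) :
    pvALoop groups ["admin", "owner", "member", "viewer"] =
    (match pvBLoop groups none with
     | some (g, _) => g
     | none => "viewer") := by
  have hB : pvBLoop groups none = (pvBest groups none).map (fun r => (pvName r, r)) :=
    pvBLoop_eq groups none
  rw [hB, pvBest_none_eq]
  simp only [pvALoop]
  by_cases h0 : "admin" ∈ groups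
  · simp [h0, pvName]
  by_cases h1 : "owner" ∈ groups
  · simp [h0, h1, pvName]
  by_cases h2 : "member" ∈ groups
  · simp [h0, h1, h2, pvName]
  by_cases h3 : "viewer" ∈ groups
  · simp [h0, h1, h2, h3, pvName]
  · simp [h0, h1, h2, h3]

-- ===== VERDICT (by name: the statement is the Claim_ definition above) =====
theorem role_from_claims_py_spec : Claim_equal_role_from_claims_py := by
  intro claims groups _
  unfold Spec_role_from_claims_py role_from_claims_py role_from_claims_py_alt
  cases (PySem.Dict.mk claims).get? "custom:role" with
  | none => exact pv_group_branch groups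
  | some e =>
    by_cases h : e ∈ pvValidRoles
    · simp [h]
    · simp [h, pv_group_branch groups]
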